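-- pv_equiv track=rewrite | github.com/MalliKarjun008/python-coding-challenges | challenge_38_fibonacci_pattern.py | generate_pattern
-- ===== SOURCE A (Python) =====
-- def generate_pattern(n):
--     result = []
--     a, b = 1, 1
--     for i in range(1, n + 1):
--         row = []
--         for _ in range(i):
--             row.append(a)
--             a, b = b, a + b
--         result.append(" ".join(map(str, row)))
--     return result
-- ===== SOURCE B (Python) =====
-- def generate_pattern(n):
--     if n <= 0:
--         return []
--     total = n * (n + 1) // 2
--     seq = []
--     a, b = 1, 1
--     for _ in range(total):
--         seq.append(a)
--         a, b = b, a + b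
--     result = []
--     for i in range(1, n + 1):
--         result.append(" ".join(map(str, seq[:i])))
--         seq = seq[i:]
--     return result
-- ===== Notes on version B (the rewrite author's own statement) =====
-- stated objective: alternative
-- what changed: B separates generation from partitioning: it first computes the total count and builds the whole flat Fibonacci list in one loop, then cuts it into rows of increasing length, instead of interleaving Fibonacci-state updates inside the row-building loop.
import Mathlib
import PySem

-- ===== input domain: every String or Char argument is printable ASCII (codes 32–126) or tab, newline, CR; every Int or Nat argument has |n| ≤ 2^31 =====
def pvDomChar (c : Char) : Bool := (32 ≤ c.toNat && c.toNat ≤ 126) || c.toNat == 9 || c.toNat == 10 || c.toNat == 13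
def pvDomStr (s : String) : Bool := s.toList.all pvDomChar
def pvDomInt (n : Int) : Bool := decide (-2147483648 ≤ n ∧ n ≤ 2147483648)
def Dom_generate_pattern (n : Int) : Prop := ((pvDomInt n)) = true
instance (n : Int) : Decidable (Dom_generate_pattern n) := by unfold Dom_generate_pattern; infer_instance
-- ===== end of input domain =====

-- B separates Fibonacci generation from row partitioning (build the flat list once, then cut it); alternative decomposition, same cost.

-- ===== PORT A =====
def generate_pattern (n : Int) : List String :=
  let st := (PySem.List.pyRange 1 (n + 1) 1).foldl
    (fun (st : List String × Int × Int) i =>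
      let inner := (PySem.List.pyRange 0 i 1).foldl
        (fun (st2 : List Int × Int × Int) _ =>
          (st2.1 ++ [st2.2.1], st2.2.2, st2.2.1 + st2.2.2))
        ([], st.2.1, st.2.2)
      (st.1 ++ [PySem.Str.join " " (inner.1.map PySem.Int.toStr)], inner.2.1, inner.2.2))
    ([], 1, 1)
  st.1

-- ===== PORT B =====
def generate_pattern_alt (n : Int) : List String :=
  if n ≤ 0 then []
  else
    let total := PySem.Int.floordiv (n * (n + 1)) 2
    let seqSt := (PySem.List.pyRange 0 total 1).foldl
      (fun (st : List Int × Int × Int) _ =>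
        (st.1 ++ [st.2.1], st.2.2, st.2.1 + st.2.2))
      ([], 1, 1)
    let fin := (PySem.List.pyRange 1 (n + 1) 1).foldl
      (fun (st : List String × List Int) i =>
        (st.1 ++ [PySem.Str.join " " ((PySem.List.slice st.2 none (some i)).map PySem.Int.toStr)],
         PySem.List.slice st.2 (some i) none))
      ([], seqSt.1)
    fin.1

-- ===== PRECONDITION & SPEC =====
def Spec_generate_pattern (n : Int) (out : List String) : Prop := out = generate_pattern_alt n
instance (n : Int) (out : List String) : Decidable (Spec_generate_pattern n out) := by unfold Spec_generate_pattern; infer_instance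

-- ===== CLAIM (what is proved, stated in full; the proofs are below) =====
def Claim_equal_generate_pattern : Prop := ∀ (n : Int), Dom_generate_pattern n → Spec_generate_pattern n (generate_pattern n)

-- ===== LEMMAS AND PROOFS =====

/-- The flat Fibonacci stream: m values starting from state (a, b). -/
def fibSeq : Int → Int → Nat → List Int
  | _, _, 0 => []
  | a, b, m + 1 => a :: fibSeq b (a + b) m

/-- The (a, b) state after m Fibonacci steps. -/
def fibNext : Int → Int → Nat → Int × Int
  | a, b, 0 => (a, b)
  | a, b, m + 1 => fibNext b (a + b) m

/-- The common specification: rows of lengths lo.toNat, (lo+1).toNat, … up to hi−1, drawn from the stream. -/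
def rowsSpec (lo hi : Int) (a b : Int) : List String :=
  if h : lo < hi then
    PySem.Str.join " " ((fibSeq a b lo.toNat).map PySem.Int.toStr)
      :: rowsSpec (lo + 1) hi (fibNext a b lo.toNat).1 (fibNext a b lo.toNat).2
  else []
termination_by (hi - lo).toNat
decreasing_by omega

theorem fibSeq_take (k : Nat) (a b : Int) (m : Nat) (h : k ≤ m) :
    (fibSeq a b m).take k = fibSeq a b k := by
  induction k generalizing a b m with
  | zero => simp [fibSeq]
  | succ j ih =>
    cases m with
    | zero => omega
    | succ m' => simpa [fibSeq] using ih b (a + b) m' (by omega)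

theorem fibSeq_drop (k : Nat) (a b : Int) (m : Nat) :
    (fibSeq a b m).drop k = fibSeq (fibNext a b k).1 (fibNext a b k).2 (m - k) := by
  induction k generalizing a b m with
  | zero => simp [fibNext]
  | succ j ih =>
    cases m with
    | zero =>
      cases hn : fibNext a b (j + 1) with
      | mk x y => simp [fibSeq]
    | succ m' => simpa [fibSeq, fibNext] using ih b (a + b) m'

/-- The shared append-one-value step, as used by A's inner loop and B's generator loop. -/
theorem genFold (l : List α) (row : List Int) (a b : Int) :
    l.foldl (fun (st : List Int × Int × Int) _ =>
        (st.1 ++ [st.2.1], st.2.2, st.2.1 + st.2.2)) (row, a, b)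
      = (row ++ fibSeq a b l.length, fibNext a b l.length) := by
  induction l generalizing row a b with
  | nil => simp [fibSeq, fibNext]
  | cons x xs ih => simp [List.foldl, fibSeq, fibNext, ih]

/-- A's outer loop produces rowsSpec. -/
theorem outerA (lo hi : Int) (acc : List String) (a b : Int) :
    ((PySem.List.pyRange lo hi 1).foldl
      (fun (st : List String × Int × Int) i =>
        let inner := (PySem.List.pyRange 0 i 1).foldl
          (fun (st2 : List Int × Int × Int) _ =>
            (st2.1 ++ [st2.2.1], st2.2.2, st2.2.1 + st2.2.2))
          ([], st.2.1, st.2.2)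
        (st.1 ++ [PySem.Str.join " " (inner.1.map PySem.Int.toStr)], inner.2.1, inner.2.2))
      (acc, a, b)).1 = acc ++ rowsSpec lo hi a b := by
  by_cases h : lo < hi
  · rw [PySem.List.pyRange_one_cons h]
    have hlen : (PySem.List.pyRange 0 lo 1).length = lo.toNat := by
      simpa using PySem.List.length_pyRange_one 0 lo
    simp only [List.foldl_cons]
    rw [genFold]
    rw [outerA (lo + 1) hi]
    conv_rhs => rw [rowsSpec]
    simp [h, hlen]
  · rw [PySem.List.pyRange_one_eq_nil (by omega), rowsSpec]
    simp [h]
termination_by (hi - lo).toNat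
decreasing_by omega

/-- The number of stream values rowsSpec consumes. -/
def needed (lo hi : Int) : Nat :=
  if h : lo < hi then lo.toNat + needed (lo + 1) hi else 0
termination_by (hi - lo).toNat
decreasing_by omega

/-- B's partition loop produces rowsSpec, given a long-enough stream. -/
theorem partB (lo hi : Int) (hlo : 1 ≤ lo) (acc : List String) (a b : Int) (m : Nat)
    (hm : needed lo hi ≤ m) :
    ((PySem.List.pyRange lo hi 1).foldl
      (fun (st : List String × List Int) i =>
        (st.1 ++ [PySem.Str.join " " ((PySem.List.slice st.2 none (some i)).map PySem.Int.toStr)],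
         PySem.List.slice st.2 (some i) none))
      (acc, fibSeq a b m)).1 = acc ++ rowsSpec lo hi a b := by
  by_cases h : lo < hi
  · rw [PySem.List.pyRange_one_cons h]
    simp only [List.foldl_cons]
    rw [PySem.List.slice_to (fibSeq a b m) (b := lo) (by omega),
        PySem.List.slice_from (fibSeq a b m) (a := lo) (by omega)]
    rw [needed] at hm
    simp only [h, dif_pos] at hm
    rw [fibSeq_take lo.toNat a b m (by omega), fibSeq_drop]
    rw [partB (lo + 1) hi (by omega) _ _ _ (m - lo.toNat) (by omega)]
    conv_rhs => rw [rowsSpec]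
    simp [h]
  · rw [PySem.List.pyRange_one_eq_nil (by omega), rowsSpec]
    simp [h]
termination_by (hi - lo).toNat
decreasing_by omega

theorem needed_formula (lo hi : Int) (hlo : 1 ≤ lo) (hhi : lo ≤ hi) :
    2 * (needed lo hi : Int) = hi * (hi - 1) - lo * (lo - 1) := by
  by_cases h : lo < hi
  · rw [needed]
    have := needed_formula (lo + 1) hi (by omega) (by omega)
    simp only [h, dif_pos]
    push_cast [Int.toNat_of_nonneg (by omega : (0:Int) ≤ lo)]
    ring_nf
    ring_nf at this
    omega
  · rw [needed]
    simp only [h, dif_neg, not_false_iff]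
    have : lo = hi := le_antisymm hhi (by omega)
    subst this
    ring
termination_by (hi - lo).toNat
decreasing_by omega

-- ===== VERDICT (by name: the statement is the Claim_ definition above) =====
theorem generate_pattern_spec : Claim_equal_generate_pattern := by
  intro n _
  unfold Spec_generate_pattern generate_pattern generate_pattern_alt
  by_cases hn : n ≤ 0
  · simp only [hn, if_pos]
    rw [PySem.List.pyRange_one_eq_nil (by omega)]
    rfl
  · simp only [hn, if_neg, not_false_iff]
    rw [outerA]
    have htot : PySem.Int.floordiv (n * (n + 1)) 2 = (needed 1 (n + 1) : Int) := by
      have h2 := needed_formula 1 (n + 1) le_rfl (by omega)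
      have : n * (n + 1) = 2 * (needed 1 (n + 1) : Int) := by ring_nf; ring_nf at h2; omega
      rw [this, PySem.Int.floordiv]
      simp [Int.mul_fdiv_cancel_left _ (by norm_num : (2:Int) ≠ 0)]
    have hlen : (PySem.List.pyRange 0 (PySem.Int.floordiv (n * (n + 1)) 2) 1).length
        = needed 1 (n + 1) := by
      rw [htot]; simpa using PySem.List.length_pyRange_one 0 (needed 1 (n + 1) : Int)
    rw [genFold, hlen]
    simp only [List.nil_append]
    rw [partB 1 (n + 1) le_rfl [] 1 1 (needed 1 (n + 1)) le_rfl]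
    simp
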